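-- pv_equiv track=rewrite | github.com/DragunWF/Competitive-Programming | CodeWars/python/6_kyu/name_to_matrix.py | matrixfy
-- ===== SOURCE A (Python) =====
-- def matrixfy(s: str) -> list[list[str]]:
--     if not s:
--         return "name must be at least one letter"
--     row_count = 1
--     while row_count ** 2 < len(s):
--         row_count += 1
--
--     matrix, row = [], []
--     for i in range(row_count ** 2):
--         row.append(s[i] if i < len(s) else ".")
--         if (i + 1) % row_count == 0:
--             matrix.append([*row])
--             row.clear()
--     return matrix
-- ===== SOURCE B (Python) =====
-- def matrixfy(s: str) -> list[list[str]]: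
--     if not s:
--         return "name must be at least one letter"
--     L = len(s)
--     # side length n = smallest integer with n*n >= L, by binary search
--     lo, hi = 1, L
--     while lo < hi:
--         mid = (lo + hi) // 2
--         if mid * mid < L:
--             lo = mid + 1
--         else:
--             hi = mid
--     n = lo
--     padded = s + "." * (n * n - L)
--     return [list(padded[r * n:(r + 1) * n]) for r in range(n)]
-- ===== Notes on version B (the rewrite author's own statement) =====
-- stated objective: faster
-- what changed: B finds the side length by binary search instead of A's linear while-loop, then pads the string once and builds rows by stride-n chunk slicing (C-level slicing) instead of A's per-character append with a modulo-triggered row flush.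
-- outside the precondition, e.g. on matrixfy(''): A returns 'name must be at least one letter', B returns 'name must be at least one letter'
import Mathlib
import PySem

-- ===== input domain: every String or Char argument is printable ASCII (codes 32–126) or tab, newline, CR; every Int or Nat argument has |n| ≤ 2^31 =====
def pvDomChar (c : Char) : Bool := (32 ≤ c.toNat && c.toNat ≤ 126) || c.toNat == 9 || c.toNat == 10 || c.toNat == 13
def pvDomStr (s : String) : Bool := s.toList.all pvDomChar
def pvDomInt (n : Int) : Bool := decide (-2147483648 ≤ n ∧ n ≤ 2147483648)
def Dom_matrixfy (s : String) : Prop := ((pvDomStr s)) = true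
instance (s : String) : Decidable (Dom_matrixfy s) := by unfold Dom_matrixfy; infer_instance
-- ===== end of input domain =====

-- B computes the side length by binary search and builds the matrix by padding once and
-- chunk-slicing, instead of A's linear while-loop and char-by-char fill with modulo row flush.
-- On the empty string A returns a plain string (not a list of lists), so Pre_ excludes it.

-- ===== PORT A =====
-- the while-loop 'while row_count ** 2 < len(s): row_count += 1'
def pvRowCount (L r : Nat) : Nat :=
  if h : r * r < L then pvRowCount L (r + 1) else r
termination_by L - r
decreasing_by
  have hr : r ≤ r * r := by
    rcases Nat.eq_zero_or_pos r with h0 | h0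
    · simp [h0]
    · calc r = r * 1 := (Nat.mul_one r).symm
        _ ≤ r * r := Nat.mul_le_mul_left r h0
  omega

def matrixfy (s : String) : List (List String) :=
  let cs := s.toList
  if cs.length = 0 then []   -- Python A returns the string "name must be at least one letter" here; outside Pre_
  else
    let n := pvRowCount cs.length 1
    let st := (List.range (n * n)).foldl
      (fun (st : List (List String) × List String) i =>
        let row := st.2 ++ [if i < cs.length then String.ofList [cs.getD i ' '] else "."]
        if (i + 1) % n = 0 then (st.1 ++ [row], []) else (st.1, row))
      ([], [])
    st.1

-- ===== PORT B =====
-- the binary-search loop 'while lo < hi: ...'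
def pvSide (L lo hi : Nat) : Nat :=
  if h : lo < hi then
    let mid := (lo + hi) / 2
    if mid * mid < L then pvSide L (mid + 1) hi else pvSide L lo mid
  else lo
termination_by hi - lo
decreasing_by all_goals omega

def matrixfy_alt (s : String) : List (List String) :=
  let cs := s.toList
  if cs.length = 0 then []   -- Python B returns the same string as A here; outside Pre_
  else
    let L := cs.length
    let n := pvSide L 1 L
    let padded := cs ++ List.replicate (n * n - L) '.'
    (PySem.List.pyRange 0 (n : Int) 1).map (fun r =>
      (PySem.List.slice padded (some (r * (n : Int))) (some ((r + 1) * (n : Int)))).map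
        (fun c => String.ofList [c]))

-- ===== PRECONDITION & SPEC =====
-- Pre_ excludes only the empty string, on which A returns a str (not a list[list[str]]).
def Pre_matrixfy (s : String) : Prop := s ≠ ""
instance (s : String) : Decidable (Pre_matrixfy s) := by unfold Pre_matrixfy; infer_instance
def pvWitness_matrixfy : String := "abcde"

def Spec_matrixfy (s : String) (out : List (List String)) : Prop := out = matrixfy_alt s
instance (s : String) (out : List (List String)) : Decidable (Spec_matrixfy s out) := by unfold Spec_matrixfy; infer_instance

-- ===== CLAIM (what is proved, stated in full; the proofs are below) =====
def Claim_equal_matrixfy : Prop := ∀ (s : String), Dom_matrixfy s → Pre_matrixfy s → Spec_matrixfy s (matrixfy s)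

-- ===== LEMMAS AND PROOFS =====

-- B's binary search returns the least n ≥ lo with L ≤ n*n, given the invariants.
theorem pvSide_spec (L : Nat) : ∀ lo hi, lo ≤ hi → L ≤ hi * hi → (∀ m, m < lo → m * m < L) →
    lo ≤ pvSide L lo hi ∧ L ≤ pvSide L lo hi * pvSide L lo hi ∧
    (∀ m, m < pvSide L lo hi → m * m < L) := by
  intro lo hi
  induction lo, hi using pvSide.induct L with
  | case1 lo hi h mid hlt ih =>
    intro hle hhi hlo
    rw [pvSide, dif_pos h]
    simp only [show (lo + hi) / 2 = mid from rfl, if_pos hlt]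
    have hm : mid = (lo + hi) / 2 := rfl
    have h1 : mid + 1 ≤ hi := by omega
    have := ih h1 hhi (by
      intro m hmlt
      rcases Nat.lt_or_ge m lo with h2 | h2
      · exact hlo m h2
      · have : m * m ≤ mid * mid := Nat.mul_le_mul (by omega) (by omega)
        omega)
    exact ⟨by omega, this.2.1, this.2.2⟩
  | case2 lo hi h mid hge ih =>
    intro hle hhi hlo
    rw [pvSide, dif_pos h]
    simp only [show (lo + hi) / 2 = mid from rfl, if_neg hge]
    have hm : mid = (lo + hi) / 2 := rfl
    exact ih (by omega) (by omega) hlo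
  | case3 lo hi h =>
    intro hle hhi hlo
    rw [pvSide, dif_neg h]
    refine ⟨le_refl _, ?_, hlo⟩
    have h1 : hi ≤ lo := by omega
    have h2 : hi * hi ≤ lo * lo := Nat.mul_le_mul h1 h1
    omega

-- A's while-loop reaches the same n, characterised by the same three properties.
theorem pvRowCount_eq (L N : Nat) (hN : L ≤ N * N) (hmin : ∀ m, m < N → m * m < L) :
    ∀ r, r ≤ N → pvRowCount L r = N := by
  intro r hr
  induction r using pvRowCount.induct L with
  | case1 r h ih =>
    rw [pvRowCount, dif_pos h]
    have : r ≠ N := by rintro rfl; omega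
    exact ih (by omega)
  | case2 r h =>
    rw [pvRowCount, dif_neg h]
    rcases Nat.lt_or_ge r N with h2 | h2
    · exact absurd (hmin r h2) h
    · omega

-- a chunked row, in indexed form
theorem row_chunk_eq (p : List Char) (n k : Nat) (h : (k + 1) * n ≤ p.length) :
    ((p.drop (k * n)).take n).map (fun c => String.ofList [c]) =
      (List.range n).map (fun t => String.ofList [p.getD (k * n + t) '.']) := by
  have h' : k * n + n ≤ p.length := by nlinarith
  apply List.ext_getElem
  · simp; omega
  · intro i h1 h2
    have hi : i < n := by simpa using h2
    have hip : k * n + i < p.length := by nlinarith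
    simp [List.getElem_take, List.getElem_drop, List.getD_eq_getElem?_getD,
      List.getElem?_eq_getElem hip]

-- A's fold over one block of n indices, starting from an empty row, flushes exactly one row.
theorem fold_block (cs : List Char) (n k L : Nat) (hn : 0 < n) :
    ∀ j, j ≤ n → ∀ (m : List (List String)),
    ((List.range j).map (fun t => k * n + t)).foldl
      (fun (st : List (List String) × List String) i =>
        let row := st.2 ++ [if i < L then String.ofList [cs.getD i ' '] else "."]
        if (i + 1) % n = 0 then (st.1 ++ [row], []) else (st.1, row)) (m, []) =
    (if j = n then
        (m ++ [(List.range n).map (fun t =>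
            if k * n + t < L then String.ofList [cs.getD (k * n + t) ' '] else ".")], [])
      else (m, (List.range j).map (fun t =>
            if k * n + t < L then String.ofList [cs.getD (k * n + t) ' '] else "."))) := by
  intro j
  induction j with
  | zero => intro hj m; simp [List.range_zero]; omega
  | succ j ih =>
    intro hj m
    have hjn : j ≤ n := by omega
    rw [List.range_succ, List.map_append, List.foldl_append, ih hjn m]
    have hjne : j ≠ n := by omega
    simp only [if_neg hjne, List.map_cons, List.map_nil, List.foldl_cons, List.foldl_nil]
    have hmod : (k * n + j + 1) % n = (j + 1) % n := by
      rw [Nat.add_assoc, Nat.mul_comm k n]; exact Nat.mul_add_mod n k (j + 1)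
    by_cases hlast : j + 1 = n
    · have hz : (k * n + j + 1) % n = 0 := by rw [hmod, hlast, Nat.mod_self]
      simp only [hz, if_pos hlast]
      rw [← hlast]
      simp [List.range_succ]
    · have hnz : (k * n + j + 1) % n ≠ 0 := by
        rw [hmod, Nat.mod_eq_of_lt (by omega)]; omega
      simp only [if_neg hnz, if_neg hlast]
      simp

-- A's full fold builds exactly the k rows, for every k ≤ n.
theorem fold_rows (cs : List Char) (n L : Nat) (hn : 0 < n) :
    ∀ k, k ≤ n →
    (List.range (k * n)).foldl
      (fun (st : List (List String) × List String) i =>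
        let row := st.2 ++ [if i < L then String.ofList [cs.getD i ' '] else "."]
        if (i + 1) % n = 0 then (st.1 ++ [row], []) else (st.1, row)) ([], []) =
    ((List.range k).map (fun k' => (List.range n).map (fun t =>
        if k' * n + t < L then String.ofList [cs.getD (k' * n + t) ' '] else ".")), []) := by
  intro k
  induction k with
  | zero => intro _; simp
  | succ k ih =>
    intro hk
    have : (k + 1) * n = k * n + n := by ring
    rw [this, List.range_add, List.foldl_append, ih (by omega)]
    have := fold_block cs n k L hn n (le_refl n)
      ((List.range k).map (fun k' => (List.range n).map (fun t =>
        if k' * n + t < L then String.ofList [cs.getD (k' * n + t) ' '] else ".")))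
    rw [this, if_pos rfl, List.range_succ, List.map_append]
    simp

-- the padded element in indexed form
theorem padded_getD (cs : List Char) (n i : Nat) (hi : i < n * n) (hL : cs.length ≤ n * n) :
    (cs ++ List.replicate (n * n - cs.length) '.').getD i '.' =
      if i < cs.length then cs.getD i ' ' else '.' := by
  by_cases h : i < cs.length
  · simp [List.getD_eq_getElem?_getD, List.getElem?_append_left h, h]
  · have h2 : i - cs.length < n * n - cs.length := by omega
    simp [List.getD_eq_getElem?_getD, List.getElem?_append_right (by omega : cs.length ≤ i),
      h2, h]

-- ===== VERDICT (by name: the statement is the Claim_ definition above) =====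
theorem matrixfy_spec : Claim_equal_matrixfy := by
  intro s _ hpre
  unfold Spec_matrixfy matrixfy matrixfy_alt
  have hne : s.toList ≠ [] := by
    intro h
    apply hpre
    have := congrArg String.ofList h
    simpa using this
  have hL0 : s.toList.length ≠ 0 := by simpa using hne
  simp only [if_neg hL0]
  set cs := s.toList with hcs
  set L := cs.length with hLdef
  -- the two side lengths agree
  obtain ⟨hn1, hnL, hmin⟩ := pvSide_spec L 1 L (by omega)
    (by nlinarith [Nat.one_le_iff_ne_zero.mpr hL0]) (by intro m hm; interval_cases m; omega)
  set n := pvSide L 1 L with hndef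
  have hA : pvRowCount L 1 = n := pvRowCount_eq L n hnL hmin 1 hn1
  rw [hA]
  -- A's side: evaluate the fold
  have hfold := fold_rows cs n L (by omega) n (le_refl n)
  simp only [hfold]
  -- B's side: pyRange and slices to indexed form
  have hplen : (cs ++ List.replicate (n * n - L) '.').length = n * n := by
    simp [← hLdef]; omega
  rw [PySem.List.pyRange_one]
  simp only [Int.sub_zero, Int.toNat_natCast, List.map_map]
  apply List.ext_getElem
  · simp
  · intro k h1 h2
    simp only [List.getElem_map, List.getElem_range, Function.comp_apply]
    have hk : k < n := by simpa using h1
    have hcast2 : ((0 : Int) + (k : Int)) * (n : Int) = (((k * n : Nat)) : Int) := by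
      push_cast; ring
    have hcast3 : ((0 : Int) + (k : Int) + 1) * (n : Int) = ((((k + 1) * n : Nat)) : Int) := by
      push_cast; ring
    rw [hcast2, hcast3, PySem.List.slice_natCast]
    have hkk : (k + 1) * n - k * n = n := by ring_nf; omega
    rw [hkk]
    have hble : (k + 1) * n ≤ (cs ++ List.replicate (n * n - L) '.').length := by
      rw [hplen]; nlinarith
    rw [row_chunk_eq _ n k hble]
    apply List.map_congr_left
    intro t ht
    have htn : t < n := List.mem_range.mp ht
    have hilt : k * n + t < n * n := by nlinarith
    rw [padded_getD cs n (k * n + t) hilt (by omega)]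
    split <;> rfl
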